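-- pv_equiv track=rewrite | github.com/Eilhwan/algorithms | newOnes/solve/bricks.py | solution
-- ===== SOURCE A (Python) =====
-- def solution(l, x):
--     answer = [1, 1]
--     l -= 1
--     for i in range(2, len(x)):
--         max_value = max(answer[i-1], answer[i-2])
--         if x[i-1] + l > x[i] > x[i-1] or x[i-1] + l > x[i] + l > x[i-1]:
--             answer.append(max_value+1)
--         else:
--             answer.append(max_value)
--     return answer
-- ===== SOURCE B (Python) =====
-- def solution(l, x):
--     # staged passes: extract the 0/1 condition values, turn them into prefix
--     # sums in place, then map each cumulative count to 1 + count.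
--     l -= 1
--     incs = [int(a + l > b > a or a + l > b + l > a) for a, b in zip(x[1:], x[2:])]
--     for k in range(1, len(incs)):
--         incs[k] += incs[k - 1]
--     return [1, 1] + [1 + c for c in incs]
-- ===== Notes on version B (the rewrite author's own statement) =====
-- stated objective: alternative
-- what changed: B replaces A's single DP pass (appending max(answer[i-1],answer[i-2]) plus a conditional increment) with three staged passes: a comprehension extracting the 0/1 condition values over zipped adjacent pairs, an in-place prefix-sum pass over that list, and a final map adding 1 to each cumulative count; correct because A's answer list is non-decreasing so each entry is 1 plus the count of satisfied conditions so far.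
import Mathlib
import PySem

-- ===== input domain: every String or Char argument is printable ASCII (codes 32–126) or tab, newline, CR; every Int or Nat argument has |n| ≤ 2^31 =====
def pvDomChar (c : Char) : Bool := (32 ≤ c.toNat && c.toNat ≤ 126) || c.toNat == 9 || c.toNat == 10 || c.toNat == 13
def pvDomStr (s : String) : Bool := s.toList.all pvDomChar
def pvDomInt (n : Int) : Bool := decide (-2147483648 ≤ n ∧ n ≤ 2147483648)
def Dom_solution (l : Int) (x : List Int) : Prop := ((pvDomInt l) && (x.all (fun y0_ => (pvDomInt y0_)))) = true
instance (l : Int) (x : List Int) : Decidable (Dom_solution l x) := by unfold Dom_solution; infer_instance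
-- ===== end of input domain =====

-- B replaces A's single DP pass (max of the two previous answers plus a conditional
-- increment) by three staged passes: extract the 0/1 condition values, prefix-sum them
-- in place, then map each cumulative count to 1 + count; same cost, different decomposition.

-- ===== PORT A =====
-- answer[i-1], answer[i-2], x[i-1], x[i] are always in range for i in range(2, len(x)),
-- so pyGetD's default 0 is never used.
def solution (l : Int) (x : List Int) : List Int :=
  let l1 := l - 1
  (PySem.List.pyRange 2 (x.length : Int) 1).foldl
    (fun answer i =>
      let maxValue := max (PySem.List.pyGetD answer (i - 1) 0) (PySem.List.pyGetD answer (i - 2) 0)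
      if (PySem.List.pyGetD x (i - 1) 0 + l1 > PySem.List.pyGetD x i 0 ∧
            PySem.List.pyGetD x i 0 > PySem.List.pyGetD x (i - 1) 0) ∨
         (PySem.List.pyGetD x (i - 1) 0 + l1 > PySem.List.pyGetD x i 0 + l1 ∧
            PySem.List.pyGetD x i 0 + l1 > PySem.List.pyGetD x (i - 1) 0)
      then answer ++ [maxValue + 1]
      else answer ++ [maxValue])
    [1, 1]

-- ===== PORT B =====
-- one step of the in-place prefix-sum pass: incs[k] += incs[k-1]; indices k and k-1 are
-- always in range (k in range(1, len(incs))), so the defaults are never used.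
def pvStep (cs : List Int) (k : Int) : List Int :=
  PySem.List.pySetD cs k (PySem.List.pyGetD cs k 0 + PySem.List.pyGetD cs (k - 1) 0)

def solution_alt (l : Int) (x : List Int) : List Int :=
  let l1 := l - 1
  let incs := (List.zip (PySem.List.slice x (some 1) none) (PySem.List.slice x (some 2) none)).map
    (fun p =>
      if (p.1 + l1 > p.2 ∧ p.2 > p.1) ∨ (p.1 + l1 > p.2 + l1 ∧ p.2 + l1 > p.1)
      then (1 : Int) else 0)
  let incs2 := (PySem.List.pyRange 1 (incs.length : Int) 1).foldl pvStep incs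
  [1, 1] ++ incs2.map (fun c => 1 + c)

-- ===== PRECONDITION & SPEC =====
def Spec_solution (l : Int) (x : List Int) (out : List Int) : Prop := out = solution_alt l x
instance (l : Int) (x : List Int) (out : List Int) : Decidable (Spec_solution l x out) := by unfold Spec_solution; infer_instance

-- ===== CLAIM (what is proved, stated in full; the proofs are below) =====
def Claim_equal_solution : Prop := ∀ (l : Int) (x : List Int), Dom_solution l x → Spec_solution l x (solution l x)

-- ===== LEMMAS AND PROOFS =====

/-- The 0/1 increment of one step, shared characterisation of both programs. -/
def pvInc (l1 a b : Int) : Int :=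
  if (a + l1 > b ∧ b > a) ∨ (a + l1 > b + l1 ∧ b + l1 > a) then 1 else 0

/-- The tail of answers produced after current last value `c` over pair list `ps` (A's view). -/
def pvSpec (l1 c : Int) : List (Int × Int) → List Int
  | [] => []
  | p :: ps => (c + pvInc l1 p.1 p.2) :: pvSpec l1 (c + pvInc l1 p.1 p.2) ps

/-- The running last value after processing `ps` starting from `c`. -/
def pvLast (l1 c : Int) : List (Int × Int) → Int
  | [] => c
  | p :: ps => pvLast l1 (c + pvInc l1 p.1 p.2) ps

/-- Running prefix sums of a value list starting from `t` (B's view). -/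
def pvScan (t : Int) : List Int → List Int
  | [] => []
  | v :: vs => (t + v) :: pvScan (t + v) vs

theorem pvInc_nonneg (l1 a b : Int) : 0 ≤ pvInc l1 a b := by
  unfold pvInc; split <;> omega

theorem pvSpec_length (l1 c : Int) (ps : List (Int × Int)) :
    (pvSpec l1 c ps).length = ps.length := by
  induction ps generalizing c with
  | nil => rfl
  | cons p ps ih => simp [pvSpec, ih]

theorem pvSpec_snoc (l1 : Int) (ps : List (Int × Int)) (p : Int × Int) (c : Int) :
    pvSpec l1 c (ps ++ [p]) = pvSpec l1 c ps ++ [pvLast l1 c ps + pvInc l1 p.1 p.2] := by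
  induction ps generalizing c with
  | nil => rfl
  | cons q qs ih => simp [pvSpec, pvLast, ih]

/-- Shape of the answer list: it ends in two entries `a ≤ pvLast`. -/
theorem pvSpec_shape (l1 : Int) (ps : List (Int × Int)) (c d : Int) (h : d ≤ c) :
    ∃ q a, d :: c :: pvSpec l1 c ps = q ++ [a, pvLast l1 c ps] ∧ a ≤ pvLast l1 c ps := by
  induction ps generalizing c d with
  | nil => exact ⟨[], d, rfl, h⟩
  | cons p ps ih =>
      obtain ⟨q, a, hq, ha⟩ :=
        ih (c + pvInc l1 p.1 p.2) c (by have := pvInc_nonneg l1 p.1 p.2; omega)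
      refine ⟨d :: q, a, ?_, ?_⟩
      · simpa [pvSpec, pvLast] using congrArg (d :: ·) hq
      · simpa [pvLast] using ha

/-- The pair list both ports walk over. -/
def pvPairs (x : List Int) : List (Int × Int) := List.zip (x.drop 1) (x.drop 2)

theorem pvPairs_length (x : List Int) : (pvPairs x).length = x.length - 2 := by
  simp [pvPairs]; omega

theorem pvPairs_get (x : List Int) (j : ℕ) (h : j < (pvPairs x).length) :
    (pvPairs x)[j] = (x.getD (j + 1) 0, x.getD (j + 2) 0) := by
  have hx := pvPairs_length x
  have e1 : 1 + j = j + 1 := by omega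
  have e2 : 2 + j = j + 2 := by omega
  simp [pvPairs, List.getElem_zip, List.getD, e2,
    List.getElem?_eq_getElem (show j + 1 < x.length by omega),
    List.getElem?_eq_getElem (show j + 2 < x.length by omega)]

/-- A's fold, after `j` iterations, equals `1 :: 1 :: pvSpec l1 1 (take j pairs)`. -/
theorem foldA (l1 : Int) (x : List Int) (j : ℕ) (hj : j ≤ (pvPairs x).length) :
    ((List.range j).map (fun (k : ℕ) => 2 + (k : Int))).foldl
      (fun answer i =>
        if (PySem.List.pyGetD x (i - 1) 0 + l1 > PySem.List.pyGetD x i 0 ∧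
              PySem.List.pyGetD x i 0 > PySem.List.pyGetD x (i - 1) 0) ∨
           (PySem.List.pyGetD x (i - 1) 0 + l1 > PySem.List.pyGetD x i 0 + l1 ∧
              PySem.List.pyGetD x i 0 + l1 > PySem.List.pyGetD x (i - 1) 0)
        then answer ++ [max (PySem.List.pyGetD answer (i - 1) 0) (PySem.List.pyGetD answer (i - 2) 0) + 1]
        else answer ++ [max (PySem.List.pyGetD answer (i - 1) 0) (PySem.List.pyGetD answer (i - 2) 0)])
      [1, 1]
    = 1 :: 1 :: pvSpec l1 1 ((pvPairs x).take j) := by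
  induction j with
  | zero => simp [pvSpec]
  | succ j ih =>
      have hj' : j ≤ (pvPairs x).length := by omega
      have hjlt : j < (pvPairs x).length := by omega
      rw [List.range_succ, List.map_append, List.foldl_append, ih hj']
      obtain ⟨q, a, hq, ha⟩ := pvSpec_shape l1 ((pvPairs x).take j) 1 1 le_rfl
      have hqlen : q.length = j := by
        have h1 : (1 :: 1 :: pvSpec l1 1 ((pvPairs x).take j)).length = j + 2 := by
          simp [pvSpec_length, List.length_take]; omega
        rw [hq] at h1; simp at h1; omega
      set b := pvLast l1 1 ((pvPairs x).take j) with hb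
      have hget1 : PySem.List.pyGetD (q ++ [a, b]) ((j + 1 : ℕ) : Int) 0 = b := by
        rw [PySem.List.pyGetD_natCast]
        have hab : [a, b].getD 1 0 = b := rfl
        rw [← hqlen, ← hab]
        simp [List.getD]
      have hget2 : PySem.List.pyGetD (q ++ [a, b]) ((j : ℕ) : Int) 0 = a := by
        rw [PySem.List.pyGetD_natCast]
        have hab : [a, b].getD 0 0 = a := rfl
        rw [← hqlen, ← hab]
        simp [List.getD]
      have hx1 : PySem.List.pyGetD x ((j + 1 : ℕ) : Int) 0 = x.getD (j + 1) 0 := by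
        rw [PySem.List.pyGetD_natCast]
      have hx2 : PySem.List.pyGetD x ((j + 2 : ℕ) : Int) 0 = x.getD (j + 2) 0 := by
        rw [PySem.List.pyGetD_natCast]
      have e1 : (2 + (j : Int)) - 1 = ((j + 1 : ℕ) : Int) := by omega
      have e2 : (2 + (j : Int)) - 2 = ((j : ℕ) : Int) := by omega
      have e3 : (2 + (j : Int)) = ((j + 2 : ℕ) : Int) := by omega
      have htake : (pvPairs x).take (j + 1)
          = (pvPairs x).take j ++ [(x.getD (j + 1) 0, x.getD (j + 2) 0)] := by
        rw [List.take_add_one, List.getElem?_eq_getElem hjlt, pvPairs_get x j hjlt]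
        rfl
      rw [htake, pvSpec_snoc]
      simp only [List.map_cons, List.map_nil, List.foldl_cons, List.foldl_nil]
      rw [hq, e1, e2, e3, hget1, hget2, hx1, hx2, max_eq_left ha]
      rw [show (1 : Int) :: 1 :: (pvSpec l1 1 ((pvPairs x).take j)
            ++ [pvLast l1 1 ((pvPairs x).take j) + pvInc l1 (x.getD (j + 1) 0) (x.getD (j + 2) 0)])
          = (1 :: 1 :: pvSpec l1 1 ((pvPairs x).take j))
            ++ [pvLast l1 1 ((pvPairs x).take j) + pvInc l1 (x.getD (j + 1) 0) (x.getD (j + 2) 0)] from by simp]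
      rw [hq, ← hb]
      clear ih
      unfold pvInc
      split <;> simp_all

theorem pvScan_length (t : Int) (vs : List Int) : (pvScan t vs).length = vs.length := by
  induction vs generalizing t with
  | nil => rfl
  | cons v vs ih => simp [pvScan, ih]

theorem pvScan_snoc (t : Int) (vs : List Int) (v : Int) :
    pvScan t (vs ++ [v]) = pvScan t vs ++ [t + vs.sum + v] := by
  induction vs generalizing t with
  | nil => simp [pvScan]
  | cons w ws ih => simp [pvScan, ih]; ring_nf

theorem pvScan_map_add (a t : Int) (vs : List Int) :
    (pvScan t vs).map (fun c => a + c) = pvScan (a + t) vs := by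
  induction vs generalizing t with
  | nil => rfl
  | cons v ws ih => simp [pvScan, ih, add_assoc]

/-- A's per-step view equals the prefix sums of the per-step increments. -/
theorem pvSpec_eq_scan (l1 c : Int) (ps : List (Int × Int)) :
    pvSpec l1 c ps = pvScan c (ps.map (fun p => pvInc l1 p.1 p.2)) := by
  induction ps generalizing c with
  | nil => rfl
  | cons p ps ih => simp [pvSpec, pvScan, ih]

theorem pvGetD_append_cons (A : List Int) (v : Int) (D : List Int) (n : Nat)
    (h : A.length = n) : (A ++ v :: D).getD n 0 = v := by
  subst h; simp [List.getD]

/-- B's in-place prefix-sum pass, after `j` iterations, has prefix-summed the first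
    `j + 1` entries and left the rest unchanged. -/
theorem foldPS (cs : List Int) (j : ℕ) (hj : j + 1 ≤ cs.length) :
    ((List.range j).map (fun (k : ℕ) => 1 + (k : Int))).foldl pvStep cs
    = pvScan 0 (cs.take (j + 1)) ++ cs.drop (j + 1) := by
  induction j with
  | zero =>
      cases cs with
      | nil => simp at hj
      | cons c rest => simp [pvScan]
  | succ j ih =>
      have hj' : j + 1 ≤ cs.length := by omega
      have hjlt : j < cs.length := by omega
      have hj1lt : j + 1 < cs.length := by omega
      rw [List.range_succ, List.map_append, List.foldl_append, ih hj']
      simp only [List.map_cons, List.map_nil, List.foldl_cons, List.foldl_nil]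
      have htake : cs.take (j + 1) = cs.take j ++ [cs[j]] := by
        rw [List.take_add_one, List.getElem?_eq_getElem hjlt]; rfl
      have hdrop : cs.drop (j + 1) = cs[j + 1] :: cs.drop (j + 2) := by
        rw [List.drop_eq_getElem_cons hj1lt]
      have hlen0 : (pvScan 0 (cs.take j)).length = j := by
        simp [pvScan_length, List.length_take]; omega
      have hlen : (pvScan 0 (cs.take j) ++ [0 + (cs.take j).sum + cs[j]]).length = j + 1 := by
        simp [hlen0]
      have hL : pvScan 0 (cs.take (j + 1)) ++ cs.drop (j + 1)
          = (pvScan 0 (cs.take j) ++ [0 + (cs.take j).sum + cs[j]])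
            ++ (cs[j + 1] :: cs.drop (j + 2)) := by
        rw [htake, pvScan_snoc, hdrop]
      rw [hL]
      unfold pvStep
      have ecast1 : (1 : Int) + (j : ℕ) - 1 = ((j : ℕ) : Int) := by omega
      have ecast : (1 : Int) + (j : ℕ) = ((j + 1 : ℕ) : Int) := by omega
      rw [ecast1, ecast]
      have hget1 : PySem.List.pyGetD
          ((pvScan 0 (cs.take j) ++ [0 + (cs.take j).sum + cs[j]])
            ++ (cs[j + 1] :: cs.drop (j + 2))) ((j + 1 : ℕ) : Int) 0 = cs[j + 1] := by
        rw [PySem.List.pyGetD_natCast]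
        exact pvGetD_append_cons _ _ _ _ hlen
      have hget2 : PySem.List.pyGetD
          ((pvScan 0 (cs.take j) ++ [0 + (cs.take j).sum + cs[j]])
            ++ (cs[j + 1] :: cs.drop (j + 2))) ((j : ℕ) : Int) 0
          = 0 + (cs.take j).sum + cs[j] := by
        rw [PySem.List.pyGetD_natCast, List.append_assoc, List.singleton_append]
        exact pvGetD_append_cons _ _ _ _ hlen0
      rw [hget1, hget2, PySem.List.pySetD_natCast]
      have hd0 : (j + 1) - (pvScan 0 (cs.take j) ++ [0 + (cs.take j).sum + cs[j]]).length = 0 := by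
        rw [hlen]; omega
      rw [List.set_append_right _ _ hlen.le, hd0, List.set_cons_zero]
      have htake2 : cs.take (j + 1 + 1) = cs.take (j + 1) ++ [cs[j + 1]] := by
        rw [List.take_add_one, List.getElem?_eq_getElem hj1lt]; rfl
      rw [htake2, pvScan_snoc, htake, pvScan_snoc]
      have hsum : (cs.take j ++ [cs[j]]).sum = (cs.take j).sum + cs[j] := by rw [List.sum_append, List.sum_singleton]
      rw [hsum]
      have hv : cs[j + 1] + (0 + (cs.take j).sum + cs[j])
          = 0 + ((cs.take j).sum + cs[j]) + cs[j + 1] := by ring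
      rw [hv]
      simp [List.append_assoc]

/-- Both ports equal the common prefix-sum specification. -/
theorem solution_eq (l : Int) (x : List Int) : solution l x = solution_alt l x := by
  have hm : ((x.length : Int) - 2).toNat = (pvPairs x).length := by
    rw [pvPairs_length]; omega
  have hA : solution l x = 1 :: 1 :: pvSpec (l - 1) 1 (pvPairs x) := by
    simp only [solution]
    rw [PySem.List.pyRange_one 2 (x.length : Int), hm,
      foldA (l - 1) x (pvPairs x).length le_rfl, List.take_length]
  have hB : solution_alt l x = 1 :: 1 :: pvSpec (l - 1) 1 (pvPairs x) := by
    have h1 : PySem.List.slice x (some 1) none = x.drop 1 := by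
      rw [PySem.List.slice_from_one]; cases x <;> rfl
    have h2 : PySem.List.slice x (some 2) none = x.drop 2 := by
      have := PySem.List.slice_from_natCast x (a := 2); simpa using this
    simp only [solution_alt, h1, h2]
    set incs : List Int := ((x.drop 1).zip (x.drop 2)).map
      (fun p => if (p.1 + (l - 1) > p.2 ∧ p.2 > p.1) ∨
          (p.1 + (l - 1) > p.2 + (l - 1) ∧ p.2 + (l - 1) > p.1) then (1 : Int) else 0) with hincs
    have hscan : (PySem.List.pyRange 1 (incs.length : Int) 1).foldl pvStep incs
        = pvScan 0 incs := by
      cases hcs : incs with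
      | nil => simp [PySem.List.pyRange, pvScan]
      | cons c rest =>
          have hlen : incs.length = rest.length + 1 := by rw [hcs]; simp
          have hcast : ((incs.length : Int) - 1).toNat = rest.length := by omega
          rw [← hcs, PySem.List.pyRange_one 1 (incs.length : Int), hcast,
            foldPS incs rest.length (by omega)]
          simp [show rest.length + 1 = incs.length from hlen.symm]
    rw [hscan, pvScan_map_add, pvSpec_eq_scan]
    have heq : incs = (pvPairs x).map (fun p => pvInc (l - 1) p.1 p.2) := by
      rw [hincs]; rfl
    rw [heq]
    norm_num
  rw [hA, hB]

-- ===== VERDICT (by name: the statement is the Claim_ definition above) =====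
theorem solution_spec : Claim_equal_solution := by
  intro l x _
  unfold Spec_solution
  exact solution_eq l x
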